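-- pv_equiv track=rewrite | github.com/rishipython/atlas | experiment/build_synth_sft.py | _strip_oe_scaffold
-- ===== SOURCE A (Python) =====
-- def _strip_oe_scaffold(code: str) -> str:
--     """Drop OpenEvolve EVOLVE-BLOCK markers + the starter docstring.
--
--     The child_code stored in evolution_trace.jsonl contains the scaffold
--     comments from the starter program.  We want pure runnable Python.
--     """
--     lines = code.splitlines()
--     keep: list[str] = []
--     in_block = False
--     started = False
--     for ln in lines:
--         if "EVOLVE-BLOCK-START" in ln:
--             in_block = True
--             continue
--         if "EVOLVE-BLOCK-END" in ln:
--             in_block = False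
--             continue
--         if in_block or started:
--             keep.append(ln)
--             started = True
--     stripped = "\n".join(keep).strip()
--     return stripped or code  # fall back if markers were absent
-- ===== SOURCE B (Python) =====
-- def _strip_oe_scaffold(code: str) -> str:
--     lines = code.splitlines()
--     rest = []
--     in_block = False
--     for i, ln in enumerate(lines):
--         if "EVOLVE-BLOCK-START" in ln:
--             in_block = True
--         elif "EVOLVE-BLOCK-END" in ln:
--             in_block = False
--         elif in_block:
--             rest = lines[i:]
--             break
--     keep = [ln for ln in rest
--             if "EVOLVE-BLOCK-START" not in ln and "EVOLVE-BLOCK-END" not in ln]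
--     stripped = "\n".join(keep).strip()
--     return stripped or code
-- ===== Notes on version B (the rewrite author's own statement) =====
-- stated objective: simpler
-- what changed: Replaced A's in_block/started latching state machine with a find-then-filter decomposition: one scan locates the first line kept inside an EVOLVE block (break), then a single filter over that suffix drops all marker lines.
import Mathlib
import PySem

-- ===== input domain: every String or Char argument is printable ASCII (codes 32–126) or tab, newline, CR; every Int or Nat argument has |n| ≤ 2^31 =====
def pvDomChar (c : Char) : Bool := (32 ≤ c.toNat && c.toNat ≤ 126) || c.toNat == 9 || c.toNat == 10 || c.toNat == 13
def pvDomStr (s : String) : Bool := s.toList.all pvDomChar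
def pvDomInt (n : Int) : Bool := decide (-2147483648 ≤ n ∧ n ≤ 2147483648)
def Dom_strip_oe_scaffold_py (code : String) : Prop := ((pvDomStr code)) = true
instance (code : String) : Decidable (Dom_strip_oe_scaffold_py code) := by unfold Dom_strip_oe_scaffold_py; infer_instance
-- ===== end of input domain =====

-- B replaces A's in_block/started state machine by find-the-first-kept-line then one filter: simpler decomposition, same O(n) cost.

-- ===== PORT A =====
-- the loop body of A, state (keep, in_block, started)
def pvLoopA (s : List String × Bool × Bool) (ln : String) : List String × Bool × Bool :=
  if PySem.Str.isIn "EVOLVE-BLOCK-START" ln then (s.1, true, s.2.2)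
  else if PySem.Str.isIn "EVOLVE-BLOCK-END" ln then (s.1, false, s.2.2)
  else if s.2.1 || s.2.2 then (s.1 ++ [ln], s.2.1, true)
  else s

def strip_oe_scaffold_py (code : String) : String :=
  let lines := PySem.Str.splitlines code
  let keep := (lines.foldl pvLoopA ([], false, false)).1
  let stripped := PySem.Str.strip (PySem.Str.join "\n" keep)
  if stripped = "" then code else stripped

-- ===== PORT B =====
-- B's break-out-of-enumerate loop: the suffix lines[i:] at the first kept line (empty if none)
def pvFindRest (lines : List String) (in_block : Bool) : List String :=
  match lines with
  | [] => []
  | ln :: rest =>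
    if PySem.Str.isIn "EVOLVE-BLOCK-START" ln then pvFindRest rest true
    else if PySem.Str.isIn "EVOLVE-BLOCK-END" ln then pvFindRest rest false
    else if in_block then ln :: rest
    else pvFindRest rest in_block

def strip_oe_scaffold_py_alt (code : String) : String :=
  let lines := PySem.Str.splitlines code
  let keep := (pvFindRest lines false).filter
    (fun ln => !PySem.Str.isIn "EVOLVE-BLOCK-START" ln && !PySem.Str.isIn "EVOLVE-BLOCK-END" ln)
  let stripped := PySem.Str.strip (PySem.Str.join "\n" keep)
  if stripped = "" then code else stripped

-- ===== PRECONDITION & SPEC =====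
def Spec_strip_oe_scaffold_py (code : String) (out : String) : Prop := out = strip_oe_scaffold_py_alt code
instance (code : String) (out : String) : Decidable (Spec_strip_oe_scaffold_py code out) := by unfold Spec_strip_oe_scaffold_py; infer_instance

-- ===== CLAIM (what is proved, stated in full; the proofs are below) =====
def Claim_equal_strip_oe_scaffold_py : Prop := ∀ (code : String), Dom_strip_oe_scaffold_py code → Spec_strip_oe_scaffold_py code (strip_oe_scaffold_py code)

-- ===== LEMMAS AND PROOFS =====
def pvNonMarker (ln : String) : Bool :=
  !PySem.Str.isIn "EVOLVE-BLOCK-START" ln && !PySem.Str.isIn "EVOLVE-BLOCK-END" ln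

theorem pvLoopA_eq (lines : List String) : ∀ (keep : List String) (ib st : Bool),
    (lines.foldl pvLoopA (keep, ib, st)).1 =
      keep ++ (if st then lines.filter pvNonMarker
               else (pvFindRest lines ib).filter pvNonMarker) := by
  induction lines with
  | nil => intro keep ib st; cases st <;> simp [pvFindRest]
  | cons ln rest ih =>
    intro keep ib st
    simp only [List.foldl, pvLoopA, pvFindRest, List.filter]
    by_cases hS : PySem.Str.isIn "EVOLVE-BLOCK-START" ln = true
    · have h1 : pvNonMarker ln = false := by
        simp only [pvNonMarker, hS, Bool.not_true, Bool.false_and]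
      simp only [hS, if_true, h1, ih]
    · by_cases hE : PySem.Str.isIn "EVOLVE-BLOCK-END" ln = true
      · have h1 : pvNonMarker ln = false := by
          simp only [pvNonMarker, hE, Bool.not_true, Bool.and_false]
        rw [Bool.not_eq_true] at hS
        simp only [hS, hE, ih, h1]
        cases st <;> simp
      · rw [Bool.not_eq_true] at hS hE
        have h1 : pvNonMarker ln = true := by
          simp only [pvNonMarker, hS, hE, Bool.not_false, Bool.and_self]
        simp only [hS, hE, h1]
        cases st
        · cases ib
          · simp only [Bool.false_or, ih]
            simp
          · simp only [ih]
            simp [h1]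
        · simp only [Bool.or_true, ih]
          simp

-- ===== VERDICT (by name: the statement is the Claim_ definition above) =====
theorem strip_oe_scaffold_py_spec : Claim_equal_strip_oe_scaffold_py := by
  intro code _
  unfold Spec_strip_oe_scaffold_py strip_oe_scaffold_py strip_oe_scaffold_py_alt
  simp only [pvLoopA_eq]
  rfl
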